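-- pv_equiv track=rewrite | github.com/Kirilko/crypto | crypto/vertical_kadrano.py | rotate_180
-- ===== SOURCE A (Python) =====
-- def rotate_180(key):
--     k = [[0,0] for i in range(len(key))]
--     t=0
--     for i,j in key:
--         k[t] = [5-i,9-j]
--         t+=1
--     k = rev(k)
--     return k
--
-- def rev(key):
--     k = []
--     for i in range(len(key)):
--         k.append(key[len(key)-1-i])
--     return k
-- ===== SOURCE B (Python) =====
-- def rotate_180(key):
--     # Forward single pass: prepend each transformed row to an accumulator,
--     # so the reversal emerges from the accumulator, with no second pass,
--     # no pre-sized list, no index counter and no reverse helper.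
--     out = []
--     for i, j in key:
--         out = [[5 - i, 9 - j]] + out
--     return out
-- ===== Notes on version B (the rewrite author's own statement) =====
-- stated objective: alternative
-- what changed: Replaces A's staged passes (index-counter transform into a pre-sized list, then a separate index-arithmetic reverse helper) by a single forward fold that prepends each transformed row to an accumulator, so the reversal emerges from the accumulation itself.
import Mathlib
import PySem

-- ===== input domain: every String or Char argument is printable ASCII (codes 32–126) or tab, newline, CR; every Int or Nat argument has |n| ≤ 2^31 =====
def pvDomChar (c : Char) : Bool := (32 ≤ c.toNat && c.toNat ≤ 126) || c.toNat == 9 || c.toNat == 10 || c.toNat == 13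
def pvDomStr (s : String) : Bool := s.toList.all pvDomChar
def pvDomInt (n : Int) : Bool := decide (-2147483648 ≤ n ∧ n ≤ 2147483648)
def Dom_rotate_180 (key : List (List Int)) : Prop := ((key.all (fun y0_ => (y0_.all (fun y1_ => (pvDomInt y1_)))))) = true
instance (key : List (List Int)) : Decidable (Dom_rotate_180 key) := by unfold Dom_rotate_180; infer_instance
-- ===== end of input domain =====

-- B replaces A's staged passes (counter-indexed transform into a pre-sized list, then a reverse
-- helper) by one forward fold prepending transformed rows to an accumulator; alternative decomposition.


-- ===== PORT A =====
-- rev(key): k = []; for i in range(len(key)): k.append(key[len(key)-1-i]); return k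
def revA (key : List (List Int)) : List (List Int) :=
  (PySem.List.pyRange 0 (key.length : Int) 1).foldl
    (fun k i => k ++ [PySem.List.pyGetD key ((key.length : Int) - 1 - i) []]) []

def rotate_180 (key : List (List Int)) : List (List Int) :=
  -- k = [[0,0] for i in range(len(key))]
  let k0 : List (List Int) := (List.range key.length).map (fun _ => [0, 0])
  -- t = 0; for i,j in key: k[t] = [5-i, 9-j]; t += 1
  -- (unpacking 'i, j' is exact on rows of length 2 — guaranteed by Pre_; pyGetD reads them)
  let st := key.foldl
    (fun (st : List (List Int) × Int) p =>
      (PySem.List.pySetD st.1 st.2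
        [5 - PySem.List.pyGetD p 0 0, 9 - PySem.List.pyGetD p 1 0], st.2 + 1))
    (k0, 0)
  revA st.1

-- ===== PORT B =====
-- out = []; for i,j in key: out = [[5-i, 9-j]] + out; return out
def rotate_180_alt (key : List (List Int)) : List (List Int) :=
  key.foldl
    (fun out p =>
      match p with
      | [i, j] => [5 - i, 9 - j] :: out
      | _ => out)   -- unreachable under Pre_ (unpacking would raise in Python)
    []

-- ===== PRECONDITION & SPEC =====
-- Pre_ excludes rows that are not pairs: on those, 'i, j = row' raises ValueError in A (and in B).
def Pre_rotate_180 (key : List (List Int)) : Prop := ∀ p ∈ key, p.length = 2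
instance (key : List (List Int)) : Decidable (Pre_rotate_180 key) := by unfold Pre_rotate_180; infer_instance
def pvWitness_rotate_180 : List (List Int) := [[1, 2], [3, 4], [0, 0]]

def Spec_rotate_180 (key : List (List Int)) (out : List (List Int)) : Prop := out = rotate_180_alt key
instance (key : List (List Int)) (out : List (List Int)) : Decidable (Spec_rotate_180 key out) := by unfold Spec_rotate_180; infer_instance

-- ===== CLAIM (what is proved, stated in full; the proofs are below) =====
def Claim_equal_rotate_180 : Prop := ∀ (key : List (List Int)), Dom_rotate_180 key → Pre_rotate_180 key → Spec_rotate_180 key (rotate_180 key)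

-- ===== LEMMAS AND PROOFS =====

-- A's elementwise transform, as the Python loop body reads a row.
def fA (p : List Int) : List Int :=
  [5 - PySem.List.pyGetD p 0 0, 9 - PySem.List.pyGetD p 1 0]

theorem fill_loop (key acc : List (List Int)) :
    key.foldl
      (fun (st : List (List Int) × Int) p =>
        (PySem.List.pySetD st.1 st.2
          [5 - PySem.List.pyGetD p 0 0, 9 - PySem.List.pyGetD p 1 0], st.2 + 1))
      (acc ++ List.replicate key.length ([0, 0] : List Int), (acc.length : Int))
    = (acc ++ key.map fA, (acc.length : Int) + key.length) := by
  induction key generalizing acc with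
  | nil => simp
  | cons p ps ih =>
    simp only [List.length_cons, List.replicate_succ, List.foldl_cons]
    have hset : PySem.List.pySetD
        (acc ++ ([0, 0] : List Int) :: List.replicate ps.length ([0, 0] : List Int))
        (acc.length : Int) (fA p)
        = (acc ++ [fA p]) ++ List.replicate ps.length ([0, 0] : List Int) := by
      rw [PySem.List.pySetD_natCast]
      rw [List.set_append_right _ _ (Nat.le_refl _)]
      simp
    simp only [fA] at hset
    rw [hset]
    simp only [List.append_assoc, List.singleton_append]
    have := ih (acc ++ [fA p])
    simp only [List.length_append, List.length_singleton, Nat.cast_add, Nat.cast_one, fA,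
      List.append_assoc, List.singleton_append] at this
    rw [this]
    simp only [List.map_cons, fA, Prod.mk.injEq]
    refine ⟨by simp, ?_⟩
    push_cast
    ring

theorem revA_eq_reverse (l : List (List Int)) : revA l = l.reverse := by
  unfold revA
  rw [PySem.List.pyRange_one]
  simp only [Int.sub_zero, Int.toNat_natCast]
  rw [PySem.List.foldl_append_singleton_eq_map]
  apply List.ext_getElem
  · simp
  · intro k h1 h2
    simp only [List.nil_append, List.map_map, List.length_map, List.length_range] at h1
    simp only [List.nil_append, List.map_map, List.getElem_map, List.getElem_range,
      Function.comp_apply, List.getElem_reverse]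
    rw [PySem.List.pyGetD_eq_getElem]
    · congr 1
      omega
    · omega
    · omega

-- B's fold prepends, so it computes the reversed map of its step function.
theorem alt_foldl_cons (key : List (List Int)) (acc : List (List Int)) :
    key.foldl
      (fun out p =>
        match p with
        | [i, j] => ([5 - i, 9 - j] : List Int) :: out
        | _ => out)
      acc
    = (key.map (fun p =>
        match p with
        | [i, j] => ([5 - i, 9 - j] : List Int)
        | _ => [])).reverse ++ acc ∨ ¬ (∀ p ∈ key, p.length = 2) := by
  induction key generalizing acc with
  | nil => left; simp
  | cons p ps ih =>
    by_cases hp : p.length = 2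
    · match p, hp with
      | [i, j], _ =>
        rcases ih (([5 - i, 9 - j] : List Int) :: acc) with h | h
        · left; simp [h]
        · right; intro hall; exact h (fun q hq => hall q (List.mem_cons_of_mem _ hq))
    · right; intro hall; exact hp (hall p (List.mem_cons_self))

-- ===== VERDICT (by name: the statement is the Claim_ definition above) =====
theorem rotate_180_spec : Claim_equal_rotate_180 := by
  intro key _ hpre
  unfold Spec_rotate_180 rotate_180
  have h0 := fill_loop key []
  simp only [List.nil_append, List.length_nil, Nat.cast_zero] at h0
  have hrep : (List.range key.length).map (fun _ => ([0, 0] : List Int))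
      = List.replicate key.length ([0, 0] : List Int) := by
    simp
  simp only [hrep, h0, revA_eq_reverse]
  unfold rotate_180_alt
  rcases alt_foldl_cons key [] with h | h
  · rw [h, List.append_nil]
    congr 1
    apply List.map_congr_left
    intro p hp
    have hplen : p.length = 2 := hpre p hp
    match p, hplen with
    | [i, j], _ => simp [fA, PySem.List.pyGetD]
  · exact absurd hpre h
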